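-- pv_equiv track=rewrite | github.com/zqwei/stock_tracker_and_action | src/portfolio_assistant/assistant/daily_briefing.py | _default_protective_actions
-- ===== SOURCE A (Python) =====
-- from typing import Any, Callable
--
-- def _default_protective_actions(checks: list[dict[str, Any]]) -> list[str]:
--     actions: list[str] = []
--     if any(check.get("key") == "wash_sale_replacements" for check in checks):
--         actions.append(
--             "Review wash-sale matches and replacement lots before making tax-sensitive decisions."
--         )
--     if any(check.get("key") == "position_concentration" for check in checks):
--         actions.append(
--             "Stress-test downside for concentrated symbols and cap new exposure until risk is acceptable."
--         )
--     if any(check.get("key") == "cash_external_tagging" for check in checks):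
--         actions.append(
--             "Finish external/internal tagging for cash rows before interpreting return metrics."
--         )
--     if any(check.get("key") == "large_unrealized_loss" for check in checks):
--         actions.append(
--             "Re-check thesis, event risk, and sizing on largest unrealized loss positions."
--         )
--     if any(check.get("key") == "missing_prices" for check in checks):
--         actions.append("Refresh or import latest prices before relying on unrealized totals.")
--
--     if not actions:
--         actions.append(
--             "No deterministic high-severity flags today; continue normal monitoring and sizing discipline."
--         )
--     return actions
-- ===== SOURCE B (Python) =====
-- _KEY_BITS = {
--     "wash_sale_replacements": 1,
--     "position_concentration": 2,
--     "cash_external_tagging": 4,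
--     "large_unrealized_loss": 8,
--     "missing_prices": 16,
-- }
--
-- _MESSAGES = [
--     "Review wash-sale matches and replacement lots before making tax-sensitive decisions.",
--     "Stress-test downside for concentrated symbols and cap new exposure until risk is acceptable.",
--     "Finish external/internal tagging for cash rows before interpreting return metrics.",
--     "Re-check thesis, event risk, and sizing on largest unrealized loss positions.",
--     "Refresh or import latest prices before relying on unrealized totals.",
-- ]
--
--
-- def _default_protective_actions(checks):
--     mask = 0
--     for check in checks:
--         mask |= _KEY_BITS.get(check.get("key"), 0)
--     actions = [msg for i, msg in enumerate(_MESSAGES) if (mask >> i) & 1]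
--     if not actions:
--         actions = [
--             "No deterministic high-severity flags today; continue normal monitoring and sizing discipline."
--         ]
--     return actions
-- ===== Notes on version B (the rewrite author's own statement) =====
-- stated objective: alternative
-- what changed: Replaces the five separate any()-scans over checks by a single pass that OR-accumulates a 5-bit integer mask of flagged keys, then decodes the mask's bits into the ordered message list.
import Mathlib
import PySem

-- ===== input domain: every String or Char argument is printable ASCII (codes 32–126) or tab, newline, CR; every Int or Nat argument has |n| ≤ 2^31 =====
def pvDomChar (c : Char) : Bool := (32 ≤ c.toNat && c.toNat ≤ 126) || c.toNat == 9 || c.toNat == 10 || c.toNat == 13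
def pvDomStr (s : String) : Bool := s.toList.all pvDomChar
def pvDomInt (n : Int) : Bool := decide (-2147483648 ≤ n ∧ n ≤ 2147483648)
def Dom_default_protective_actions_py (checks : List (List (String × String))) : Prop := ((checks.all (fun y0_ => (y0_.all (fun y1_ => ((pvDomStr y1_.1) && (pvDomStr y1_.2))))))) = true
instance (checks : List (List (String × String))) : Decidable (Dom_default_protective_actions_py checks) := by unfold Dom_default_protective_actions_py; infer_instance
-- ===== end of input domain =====

-- B replaces A's five any()-scans by a single pass OR-accumulating a 5-bit integer mask of
-- flagged keys, then decoding the mask's bits into the ordered message list (objective: alternative).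

-- ===== PORT A =====
def default_protective_actions_py (checks : List (List (String × String))) : List String :=
  let actions : List String := []
  let actions := if checks.any (fun c => PySem.Dict.get? (PySem.Dict.mk c) "key" == some "wash_sale_replacements")
    then actions ++ ["Review wash-sale matches and replacement lots before making tax-sensitive decisions."] else actions
  let actions := if checks.any (fun c => PySem.Dict.get? (PySem.Dict.mk c) "key" == some "position_concentration")
    then actions ++ ["Stress-test downside for concentrated symbols and cap new exposure until risk is acceptable."] else actions
  let actions := if checks.any (fun c => PySem.Dict.get? (PySem.Dict.mk c) "key" == some "cash_external_tagging")
    then actions ++ ["Finish external/internal tagging for cash rows before interpreting return metrics."] else actions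
  let actions := if checks.any (fun c => PySem.Dict.get? (PySem.Dict.mk c) "key" == some "large_unrealized_loss")
    then actions ++ ["Re-check thesis, event risk, and sizing on largest unrealized loss positions."] else actions
  let actions := if checks.any (fun c => PySem.Dict.get? (PySem.Dict.mk c) "key" == some "missing_prices")
    then actions ++ ["Refresh or import latest prices before relying on unrealized totals."] else actions
  if actions = [] then
    ["No deterministic high-severity flags today; continue normal monitoring and sizing discipline."]
  else actions

-- ===== PORT B =====
def pvKeyBits : PySem.Dict String Nat := PySem.Dict.mk
  [("wash_sale_replacements", 1), ("position_concentration", 2), ("cash_external_tagging", 4),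
   ("large_unrealized_loss", 8), ("missing_prices", 16)]

def pvMessages : List String :=
  ["Review wash-sale matches and replacement lots before making tax-sensitive decisions.",
   "Stress-test downside for concentrated symbols and cap new exposure until risk is acceptable.",
   "Finish external/internal tagging for cash rows before interpreting return metrics.",
   "Re-check thesis, event risk, and sizing on largest unrealized loss positions.",
   "Refresh or import latest prices before relying on unrealized totals."]

-- _KEY_BITS.get(check.get("key"), 0): a None key is absent from the dict, so it yields the default 0
def pvKeyBitOf (o : Option String) : Nat :=
  match o with
  | some k => PySem.Dict.getD pvKeyBits k 0
  | none => 0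

def default_protective_actions_py_alt (checks : List (List (String × String))) : List String :=
  let mask : Nat := checks.foldl (fun m c => m ||| pvKeyBitOf (PySem.Dict.get? (PySem.Dict.mk c) "key")) 0
  -- (mask >> i) & 1 is truthy  ↔  Nat.testBit mask i  (mask is a nonnegative Python int)
  let actions := ((PySem.List.enumerate pvMessages).filter (fun im => mask.testBit im.1.toNat)).map Prod.snd
  if actions = [] then
    ["No deterministic high-severity flags today; continue normal monitoring and sizing discipline."]
  else actions

-- ===== PRECONDITION & SPEC =====
def Spec_default_protective_actions_py (checks : List (List (String × String))) (out : List String) : Prop := out = default_protective_actions_py_alt checks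
instance (checks : List (List (String × String))) (out : List String) : Decidable (Spec_default_protective_actions_py checks out) := by unfold Spec_default_protective_actions_py; infer_instance

-- ===== CLAIM (what is proved, stated in full; the proofs are below) =====
def Claim_equal_default_protective_actions_py : Prop := ∀ (checks : List (List (String × String))), Dom_default_protective_actions_py checks → Spec_default_protective_actions_py checks (default_protective_actions_py checks)

-- ===== LEMMAS AND PROOFS =====
lemma pv_testBit_foldl (checks : List (List (String × String))) (start : Nat) (b : Nat) :
    (checks.foldl (fun m c => m ||| pvKeyBitOf (PySem.Dict.get? (PySem.Dict.mk c) "key")) start).testBit b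
      = (start.testBit b
          || checks.any (fun c => (pvKeyBitOf (PySem.Dict.get? (PySem.Dict.mk c) "key")).testBit b)) := by
  induction checks generalizing start with
  | nil => simp
  | cons c cs ih => simp [List.foldl_cons, ih, Nat.testBit_or, Bool.or_assoc]

lemma pv_keyBit_testBit (o : Option String) (b : Nat) (hb : b < 5) :
    (pvKeyBitOf o).testBit b
      = (o == some (["wash_sale_replacements", "position_concentration", "cash_external_tagging",
                     "large_unrealized_loss", "missing_prices"].get ⟨b, hb⟩)) := by
  have hv : pvKeyBitOf o =
      if o == some "wash_sale_replacements" then 1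
      else if o == some "position_concentration" then 2
      else if o == some "cash_external_tagging" then 4
      else if o == some "large_unrealized_loss" then 8
      else if o == some "missing_prices" then 16 else 0 := by
    cases o with
    | none => simp [pvKeyBitOf]
    | some s =>
      simp only [pvKeyBitOf, pvKeyBits, PySem.Dict.getD, PySem.Dict.get?,
        List.find?_cons, Option.some_beq_some]
      split_ifs with h1 h2 h3 h4 h5 <;> simp_all
      · have e1 : ("wash_sale_replacements" == s) = false := by
          simp only [beq_eq_false_iff_ne]; exact fun h => h1 h.symm
        have e2 : ("position_concentration" == s) = false := by
          simp only [beq_eq_false_iff_ne]; exact fun h => h2 h.symm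
        have e3 : ("cash_external_tagging" == s) = false := by
          simp only [beq_eq_false_iff_ne]; exact fun h => h3 h.symm
        have e4 : ("large_unrealized_loss" == s) = false := by
          simp only [beq_eq_false_iff_ne]; exact fun h => h4 h.symm
        have e5 : ("missing_prices" == s) = false := by
          simp only [beq_eq_false_iff_ne]; exact fun h => h5 h.symm
        simp [e1, e2, e3, e4, e5]
  rw [hv]
  interval_cases b <;> split_ifs <;> simp_all <;> decide

-- ===== VERDICT (by name: the statement is the Claim_ definition above) =====
theorem default_protective_actions_py_spec : Claim_equal_default_protective_actions_py := by
  intro checks _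
  unfold Spec_default_protective_actions_py default_protective_actions_py default_protective_actions_py_alt pvMessages
  have hm : ∀ (b : Nat) (hb : b < 5),
      (checks.foldl (fun m c => m ||| pvKeyBitOf (PySem.Dict.get? (PySem.Dict.mk c) "key")) 0).testBit b
        = checks.any (fun c => PySem.Dict.get? (PySem.Dict.mk c) "key"
            == some (["wash_sale_replacements", "position_concentration", "cash_external_tagging",
                      "large_unrealized_loss", "missing_prices"].get ⟨b, hb⟩)) := by
    intro b hb
    rw [pv_testBit_foldl]
    simp only [Nat.zero_testBit, Bool.false_or]
    congr 1; funext c; exact pv_keyBit_testBit _ b hb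
  have h0 := hm 0 (by norm_num); have h1 := hm 1 (by norm_num)
  have h2 := hm 2 (by norm_num); have h3 := hm 3 (by norm_num)
  have h4 := hm 4 (by norm_num)
  simp only [List.get] at h0 h1 h2 h3 h4
  simp only [PySem.List.enumerate_cons, PySem.List.enumerate_nil, List.filter,
    show ((0 : Int).toNat) = 0 from rfl, show ((0 : Int) + 1).toNat = 1 from rfl,
    show ((0 : Int) + 1 + 1).toNat = 2 from rfl, show ((0 : Int) + 1 + 1 + 1).toNat = 3 from rfl,
    show ((0 : Int) + 1 + 1 + 1 + 1).toNat = 4 from rfl, h0, h1, h2, h3, h4]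
  by_cases a1 : checks.any (fun c => PySem.Dict.get? (PySem.Dict.mk c) "key" == some "wash_sale_replacements") <;>
  by_cases a2 : checks.any (fun c => PySem.Dict.get? (PySem.Dict.mk c) "key" == some "position_concentration") <;>
  by_cases a3 : checks.any (fun c => PySem.Dict.get? (PySem.Dict.mk c) "key" == some "cash_external_tagging") <;>
  by_cases a4 : checks.any (fun c => PySem.Dict.get? (PySem.Dict.mk c) "key" == some "large_unrealized_loss") <;>
  by_cases a5 : checks.any (fun c => PySem.Dict.get? (PySem.Dict.mk c) "key" == some "missing_prices") <;>
  simp [a1, a2, a3, a4, a5]
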